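-- pv_equiv track=rewrite | github.com/rangbm-wandererhc/wordplay-macro-program | wordplay/WP-F/parser.py | trimspace
-- ===== SOURCE A (Python) =====
-- def trimspace(test_str): #trimming space
-- 	word = ''
-- 	for i in test_str:
-- 		if i == ' ':
-- 			return word
-- 		else:
-- 			word +=i
-- 	return word
-- ===== SOURCE B (Python) =====
-- def trimspace(test_str): #trimming space
--     idx = test_str.find(' ')
--     if idx == -1:
--         return test_str
--     return test_str[:idx]
-- ===== Notes on version B (the rewrite author's own statement) =====
-- stated objective: simpler
-- what changed: Replaced the character-by-character accumulation loop (with early return on space) by a single locate-then-slice: find the first space's index once and slice the string up to it.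
import Mathlib
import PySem

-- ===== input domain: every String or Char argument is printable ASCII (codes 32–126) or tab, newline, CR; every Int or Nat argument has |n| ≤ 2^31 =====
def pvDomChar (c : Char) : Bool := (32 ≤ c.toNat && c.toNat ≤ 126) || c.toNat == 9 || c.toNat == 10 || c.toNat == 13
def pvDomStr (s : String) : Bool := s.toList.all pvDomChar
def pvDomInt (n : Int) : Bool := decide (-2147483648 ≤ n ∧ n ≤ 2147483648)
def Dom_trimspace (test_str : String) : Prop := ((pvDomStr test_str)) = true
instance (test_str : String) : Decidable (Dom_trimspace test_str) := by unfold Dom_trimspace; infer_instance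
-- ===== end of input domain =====

-- B replaces A's char-by-char accumulation loop with one find of the first space and one slice (objective: simpler).

-- ===== PORT A =====
-- the loop: for i in test_str: if i == ' ': return word else: word += i
def trimspaceLoop : List Char → List Char → List Char
  | [], word => word
  | i :: rest, word => if i = ' ' then word else trimspaceLoop rest (word ++ [i])

def trimspace (test_str : String) : String :=
  String.ofList (trimspaceLoop test_str.toList [])

-- ===== PORT B =====
def trimspace_alt (test_str : String) : String :=
  let idx := PySem.Str.find test_str " "
  if idx = -1 then test_str else PySem.Str.slice test_str none (some idx)

-- ===== PRECONDITION & SPEC =====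
def Spec_trimspace (test_str : String) (out : String) : Prop := out = trimspace_alt test_str
instance (test_str : String) (out : String) : Decidable (Spec_trimspace test_str out) := by unfold Spec_trimspace; infer_instance

-- ===== CLAIM (what is proved, stated in full; the proofs are below) =====
def Claim_equal_trimspace : Prop := ∀ (test_str : String), Dom_trimspace test_str → Spec_trimspace test_str (trimspace test_str)

-- ===== LEMMAS AND PROOFS =====

-- A's accumulator factors out
theorem trimspaceLoop_acc (cs : List Char) (word : List Char) :
    trimspaceLoop cs word = word ++ trimspaceLoop cs [] := by
  induction cs generalizing word with
  | nil => simp [trimspaceLoop]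
  | cons c rest ih =>
    by_cases h : c = ' '
    · simp [trimspaceLoop, h]
    · rw [trimspaceLoop, trimspaceLoop, if_neg h, if_neg h]
      simp only [List.nil_append]
      rw [ih (word ++ [c]), ih [c]]
      simp

-- A's loop is takeWhile (· ≠ ' ')
theorem trimspaceLoop_eq_takeWhile (cs : List Char) :
    trimspaceLoop cs [] = cs.takeWhile (fun c => c ≠ ' ') := by
  induction cs with
  | nil => simp [trimspaceLoop]
  | cons c rest ih =>
    by_cases h : c = ' '
    · simp [trimspaceLoop, List.takeWhile, h]
    · rw [trimspaceLoop, if_neg h, trimspaceLoop_acc]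
      simp only [List.nil_append, List.takeWhile]
      simp [h, ih]

theorem singleton_prefix_iff (l : List Char) (c : Char) : [c] <+: l ↔ l[0]? = some c := by
  cases l with
  | nil => simp
  | cons x xs =>
    constructor
    · rintro ⟨t, ht⟩
      simp at ht
      simp [ht.1]
    · intro h
      simp at h
      exact ⟨xs, by simp [h]⟩

theorem takeWhile_eq_take_of_first (cs : List Char) (k : Nat)
    (hk : cs[k]? = some ' ') (h : ∀ i < k, cs[i]? ≠ some ' ') :
    cs.takeWhile (fun c => c ≠ ' ') = cs.take k := by
  induction cs generalizing k with
  | nil => simp at hk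
  | cons c rest ih =>
    cases k with
    | zero =>
      simp at hk
      simp [List.takeWhile, hk]
    | succ k =>
      have hc : c ≠ ' ' := by
        intro hc
        exact h 0 (Nat.succ_pos _) (by simp [hc])
      simp only [List.takeWhile, hc, decide_not, decide_false, Bool.not_false,
        List.take_succ_cons, List.cons_inj_right]
      simpa using ih k (by simpa using hk) (fun i hi => by simpa using h (i + 1) (by omega))

theorem takeWhile_eq_self_of_not_mem (cs : List Char) (h : ' ' ∉ cs) :
    cs.takeWhile (fun c => c ≠ ' ') = cs := by
  apply List.takeWhile_eq_self_iff.mpr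
  intro x hx
  simp
  exact fun he => h (he ▸ hx)

-- ===== VERDICT (by name: the statement is the Claim_ definition above) =====
theorem trimspace_spec : Claim_equal_trimspace := by
  intro s _
  unfold Spec_trimspace trimspace trimspace_alt
  rw [trimspaceLoop_eq_takeWhile]
  by_cases hf : PySem.Str.find s " " = -1
  · -- no space: takeWhile is all of s
    simp only [hf, reduceIte]
    have hni : ¬ ([' '] <:+: s.toList) := by
      have := (PySem.Str.find_eq_neg_one_iff s " ").mp hf
      simpa using this
    have hmem : ' ' ∉ s.toList := by
      intro hm
      obtain ⟨i, hi⟩ := List.getElem?_of_mem hm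
      have hp : [' '] <+: s.toList.drop i := (singleton_prefix_iff _ _).mpr (by
        simp [List.getElem?_drop, hi])
      exact hni (hp.isInfix.trans (List.drop_suffix i s.toList).isInfix)
    rw [takeWhile_eq_self_of_not_mem _ hmem]
    simp
  · rw [if_neg hf]
    have hpos : 0 ≤ PySem.Str.find s " " := by
      have := PySem.Chars.neg_one_le_find s.toList (" ".toList)
      rw [PySem.Str.find_eq] at hf ⊢
      omega
    set k := (PySem.Chars.find s.toList " ".toList).toNat with hkdef
    have hspec := PySem.Chars.find_spec (s := s.toList) (sub := " ".toList)
      (by rw [PySem.Str.find_eq] at hpos; exact hpos)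
    have hsp : " ".toList = [' '] := rfl
    rw [hsp] at hspec
    have hk : s.toList[k]? = some ' ' := by
      have := hspec.1
      rw [singleton_prefix_iff] at this
      simpa [hkdef] using this
    have hbefore : ∀ i < k, s.toList[i]? ≠ some ' ' := by
      intro i hi hcon
      exact hspec.2 i hi ((singleton_prefix_iff _ _).mpr (by simpa using hcon))
    apply String.toList_inj.mp
    rw [takeWhile_eq_take_of_first _ k hk hbefore]
    simp only [PySem.Str.toList_slice, PySem.Chars.slice_eq_listSlice]
    rw [PySem.List.slice_to]
    · simp [hkdef, PySem.Str.find_eq]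
    · exact hpos
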